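-- pv_equiv track=rewrite | github.com/JYPark-Code/CodingTestAlgorithm | 프로그래머스/3/12979. 기지국 설치/기지국 설치.py | solution
-- ===== SOURCE A (Python) =====
-- def solution(n, stations, w):
--     answer = 0
--     idx = 1  # 아파트 위치 (1부터 시작)
--     station_idx = 0  # 현재 기지국 인덱스
--
--     while idx <= n:
--         # 현재 위치가 기지국 커버 범위 내인지 확인
--         if station_idx < len(stations) and idx >= stations[station_idx] - w:
--             # 기지국 커버 범위 내이면, 해당 기지국의 커버 끝 부분으로 이동
--             idx = stations[station_idx] + w + 1
--             station_idx += 1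
--         else:
--             # 커버되지 않은 경우, 새로운 기지국 추가
--             answer += 1
--             idx += (2 * w + 1)  # 한 번에 커버할 수 있는 최대 거리만큼 이동
--
--     return answer
-- ===== SOURCE B (Python) =====
-- def solution(n, stations, w):
--     # Per-gap arithmetic: one ceiling division per uncovered interval instead of
--     # stepping apartment positions one coverage-width at a time.
--     L = 2 * w + 1
--     answer = 0
--     idx = 1
--     for s in stations:
--         if idx > n:
--             break
--         gap = max(0, min(s - w, n + 1) - idx)
--         k = -(-gap // L)
--         answer += k
--         idx += k * L
--         if idx > n:
--             return answer
--         idx = s + w + 1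
--     if idx <= n:
--         answer += -(-(n + 1 - idx) // L)
--     return answer
-- ===== Notes on version B (the rewrite author's own statement) =====
-- stated objective: alternative
-- what changed: Replaces A's position-by-position while loop (which advances one coverage width 2w+1 per iteration through every uncovered stretch) by a single pass over the stations list that computes the number of new stations for each uncovered gap in one ceiling division.
import Mathlib
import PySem

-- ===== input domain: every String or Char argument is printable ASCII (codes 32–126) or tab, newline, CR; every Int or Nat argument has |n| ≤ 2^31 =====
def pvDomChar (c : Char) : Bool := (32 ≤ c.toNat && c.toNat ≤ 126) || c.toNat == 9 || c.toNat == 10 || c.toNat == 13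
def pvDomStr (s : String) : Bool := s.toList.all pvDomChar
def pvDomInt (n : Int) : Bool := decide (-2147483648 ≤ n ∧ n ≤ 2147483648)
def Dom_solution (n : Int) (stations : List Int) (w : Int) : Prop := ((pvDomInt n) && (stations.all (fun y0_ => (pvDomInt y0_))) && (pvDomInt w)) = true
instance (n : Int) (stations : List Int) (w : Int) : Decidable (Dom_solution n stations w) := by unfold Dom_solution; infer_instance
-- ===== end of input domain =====

-- B replaces A's width-by-width position stepping with one ceiling division per
-- uncovered gap (objective: alternative algorithm, one pass over the station list).

-- ===== PORT A =====
-- A is one while-loop; its `else` steps (answer += 1; idx += 2*w+1) between two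
-- `if`-branch events are expressed as the helper `fillA` (same unit steps, same order);
-- the `L ≤ 0` bail only makes the function total: on Pre_ (0 ≤ w) it is never taken
-- (Python A does not return when 2*w+1 ≤ 0 and 1 ≤ n).
def fillA (L m answer idx : Int) : Int × Int :=
  if m ≤ idx then (answer, idx)
  else if L ≤ 0 then (answer, idx)
  else fillA L m (answer + 1) (idx + L)
termination_by (m - idx).toNat
decreasing_by omega

def loopA (n w : Int) (answer idx : Int) : List Int → Int
  | [] => (fillA (2 * w + 1) (n + 1) answer idx).1
  | s :: rest =>
      let p := fillA (2 * w + 1) (min (s - w) (n + 1)) answer idx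
      if p.2 > n then p.1 else loopA n w p.1 (s + w + 1) rest

def solution (n : Int) (stations : List Int) (w : Int) : Int :=
  loopA n w 0 1 stations

-- ===== PORT B =====
-- ceiling division -(-a // L), exactly Source B's `-(-a // L)` (Python floor division)
def ceilDivB (a L : Int) : Int := -(PySem.Int.floordiv (-a) L)

def loopB (n w L : Int) (answer idx : Int) : List Int → Int
  | [] => if idx ≤ n then answer + ceilDivB (n + 1 - idx) L else answer
  | s :: rest =>
      if idx > n then answer   -- Source B: break, then the final `if idx <= n` is false
      else
        let gap := max 0 (min (s - w) (n + 1) - idx)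
        let k := ceilDivB gap L
        if idx + k * L > n then answer + k
        else loopB n w L (answer + k) (s + w + 1) rest

def solution_alt (n : Int) (stations : List Int) (w : Int) : Int :=
  loopB n w (2 * w + 1) 0 1 stations

-- ===== PRECONDITION & SPEC =====
-- Pre_ excludes exactly the inputs on which Python A never returns: when w < 0 the
-- step 2*w+1 is ≤ 0, so with 1 ≤ n the while-loop runs forever; A returns on all
-- other inputs, so Pre_ excludes nothing A returns on.
def Pre_solution (n : Int) (stations : List Int) (w : Int) : Prop := 0 ≤ w ∨ n ≤ 0
instance (n : Int) (stations : List Int) (w : Int) : Decidable (Pre_solution n stations w) := by unfold Pre_solution; infer_instance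
def pvWitness_solution : Int × List Int × Int := (11, [4, 11], 1)

def Spec_solution (n : Int) (stations : List Int) (w : Int) (out : Int) : Prop := out = solution_alt n stations w
instance (n : Int) (stations : List Int) (w : Int) (out : Int) : Decidable (Spec_solution n stations w out) := by unfold Spec_solution; infer_instance

-- ===== CLAIM (what is proved, stated in full; the proofs are below) =====
def Claim_equal_solution : Prop := ∀ (n : Int) (stations : List Int) (w : Int), Dom_solution n stations w → Pre_solution n stations w → Spec_solution n stations w (solution n stations w)

-- ===== LEMMAS AND PROOFS =====

theorem ceilDivB_bounds (a L : Int) (hL : 0 < L) :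
    (ceilDivB a L - 1) * L < a ∧ a ≤ ceilDivB a L * L := by
  have := (PySem.Int.neg_floordiv_neg_eq_iff_of_pos (a := a) (b := L) (q := ceilDivB a L) hL).mp rfl
  exact this

theorem ceilDivB_nonpos (a L : Int) (hL : 0 < L) (ha : a ≤ 0) : ceilDivB a L ≤ 0 := by
  rcases ceilDivB_bounds a L hL with ⟨h1, _⟩
  by_contra h
  push_neg at h
  have : 0 ≤ (ceilDivB a L - 1) * L := mul_nonneg (by omega) (by omega)
  omega

theorem ceilDivB_pos (a L : Int) (hL : 0 < L) (ha : 0 < a) : 1 ≤ ceilDivB a L := by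
  rcases ceilDivB_bounds a L hL with ⟨_, h2⟩
  by_contra h
  push_neg at h
  have : ceilDivB a L * L ≤ 0 := mul_nonpos_of_nonpos_of_nonneg (by omega) (by omega)
  omega

theorem ceilDivB_max (g L : Int) (hL : 0 < L) :
    ceilDivB (max 0 g) L = max 0 (ceilDivB g L) := by
  rcases le_or_gt g 0 with hg | hg
  · have h0 : ceilDivB 0 L = 0 := by
      apply (PySem.Int.neg_floordiv_neg_eq_iff_of_pos (a := (0 : Int)) (b := L) (q := 0) hL).mpr
      constructor
      · have : ((0 : Int) - 1) * L = -L := by ring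
        omega
      · simp
    have : max 0 g = 0 := by omega
    rw [this, h0]
    have := ceilDivB_nonpos g L hL hg
    omega
  · have h1 : max 0 g = g := by omega
    have := ceilDivB_pos g L hL hg
    rw [h1]
    omega

-- succ step for the ceiling: for 0 < g, ceil(g/L) = ceil((g-L)/L) + 1 on the max-0 level
theorem ceil_step (g L : Int) (hL : 0 < L) (hg : 0 < g) :
    max 0 (ceilDivB g L) = max 0 (ceilDivB (g - L) L) + 1 := by
  rcases le_or_gt (g - L) 0 with h | h
  · have hr : max 0 (ceilDivB (g - L) L) = 0 := by
      have := ceilDivB_nonpos (g - L) L hL h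
      omega
    have hone : ceilDivB g L = 1 := by
      exact (PySem.Int.neg_floordiv_neg_eq_iff_of_pos (a := g) (b := L) (q := 1) hL).mpr
        (by constructor <;> simp <;> omega)
    rw [hr, hone]; omega
  · have hq := ceilDivB_bounds (g - L) L hL
    set q := ceilDivB (g - L) L with hqdef
    have hq1 : 1 ≤ q := ceilDivB_pos (g - L) L hL h
    have hgq : ceilDivB g L = q + 1 := by
      apply (PySem.Int.neg_floordiv_neg_eq_iff_of_pos (a := g) (b := L) (q := q + 1) hL).mpr
      constructor
      · have : (q + 1 - 1) * L = (q - 1) * L + L := by ring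
        rcases hq with ⟨h1, _⟩
        omega
      · have : (q + 1) * L = q * L + L := by ring
        rcases hq with ⟨_, h2⟩
        omega
    rw [hgq]
    have hg1 : 1 ≤ ceilDivB g L := ceilDivB_pos g L hL hg
    omega

theorem fillA_spec (L m answer idx : Int) (hL : 0 < L) :
    fillA L m answer idx =
      (answer + max 0 (ceilDivB (m - idx) L), idx + max 0 (ceilDivB (m - idx) L) * L) := by
  by_cases h : m ≤ idx
  · rw [fillA]
    simp only [if_pos h]
    have := ceilDivB_nonpos (m - idx) L hL (by omega)
    have hmax : max 0 (ceilDivB (m - idx) L) = 0 := by omega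
    rw [hmax]; simp
  · rw [fillA]
    simp only [if_neg h, if_neg (by omega : ¬ L ≤ 0)]
    rw [fillA_spec L m (answer + 1) (idx + L) hL]
    have hstep := ceil_step (m - idx) L hL (by omega)
    have : m - (idx + L) = (m - idx) - L := by ring
    rw [this, hstep]
    simp only [Prod.mk.injEq]
    constructor <;> ring
termination_by (m - idx).toNat
decreasing_by omega

theorem loop_eq (n w : Int) (hw : 0 ≤ w) :
    ∀ (rest : List Int) (answer idx : Int),
      loopA n w answer idx rest = loopB n w (2 * w + 1) answer idx rest := by
  have hL : (0 : Int) < 2 * w + 1 := by omega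
  intro rest
  induction rest with
  | nil =>
    intro answer idx
    rw [loopA, loopB, fillA_spec _ _ _ _ hL]
    by_cases h : idx ≤ n
    · have hpos := ceilDivB_pos (n + 1 - idx) (2 * w + 1) hL (by omega)
      simp only [if_pos h]
      have : max 0 (ceilDivB (n + 1 - idx) (2 * w + 1)) = ceilDivB (n + 1 - idx) (2 * w + 1) := by omega
      rw [this]
    · have hnp := ceilDivB_nonpos (n + 1 - idx) (2 * w + 1) hL (by omega)
      simp only [if_neg h]
      have : max 0 (ceilDivB (n + 1 - idx) (2 * w + 1)) = 0 := by omega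
      rw [this]; simp
  | cons s rest ih =>
    intro answer idx
    rw [loopA, loopB, fillA_spec _ _ _ _ hL]
    simp only []
    by_cases h : idx > n
    · -- gap ≤ 0, so A's fill is a no-op and p.2 = idx > n
      have hg : min (s - w) (n + 1) - idx ≤ 0 := by
        have : min (s - w) (n + 1) ≤ n + 1 := min_le_right _ _
        omega
      have := ceilDivB_nonpos (min (s - w) (n + 1) - idx) (2 * w + 1) hL hg
      have hmax : max 0 (ceilDivB (min (s - w) (n + 1) - idx) (2 * w + 1)) = 0 := by omega
      rw [hmax]
      simp only [if_pos h]
      simp [h]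
    · simp only [if_neg h]
      rw [ceilDivB_max _ _ hL]
      set k := max 0 (ceilDivB (min (s - w) (n + 1) - idx) (2 * w + 1)) with hk
      by_cases h2 : idx + k * (2 * w + 1) > n
      · simp [h2]
      · simp only [if_neg h2]
        exact ih (answer + k) (s + w + 1)

-- the n ≤ 0 case: both programs return `answer = 0` at once, for every w
theorem both_zero (n : Int) (stations : List Int) (w : Int) (hn : n ≤ 0) :
    solution n stations w = 0 ∧ solution_alt n stations w = 0 := by
  constructor
  · unfold solution
    cases stations with
    | nil =>
      rw [loopA, fillA]
      simp only [if_pos (by omega : n + 1 ≤ (1 : Int))]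
    | cons s rest =>
      rw [loopA, fillA]
      have hm : min (s - w) (n + 1) ≤ (1 : Int) := by
        have : min (s - w) (n + 1) ≤ n + 1 := min_le_right _ _
        omega
      simp only [if_pos hm]
      simp only [if_pos (by omega : (1 : Int) > n)]
  · unfold solution_alt
    cases stations with
    | nil =>
      rw [loopB]
      simp only [if_neg (by omega : ¬ (1 : Int) ≤ n)]
    | cons s rest =>
      rw [loopB]
      simp only [if_pos (by omega : (1 : Int) > n)]

-- ===== VERDICT (by name: the statement is the Claim_ definition above) =====
theorem solution_spec : Claim_equal_solution := by
  intro n stations w _ hpre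
  unfold Spec_solution
  rcases hpre with hw | hn
  · unfold solution solution_alt
    exact loop_eq n w hw stations 0 1
  · rcases both_zero n stations w hn with ⟨h1, h2⟩
    rw [h1, h2]
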